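-- pv_equiv track=rewrite | github.com/htsofie/phospho-idr | scripts/archive/align_to_full_seq.py | _compute_phospho_protein_pos_from_alignment
-- ===== SOURCE A (Python) =====
-- from typing import Dict, Optional, Any, List, Tuple
--
-- def _compute_phospho_protein_pos_from_alignment(aln_prot: str, aln_pep: str, start: int, phospho_pos_in_peptide: int) -> Optional[int]:
--     """Translate phosphosite position in peptide to 1-based protein position using an alignment."""
--     peptide_position_counter = 0
--     protein_position_counter = start
--
--     for prot_char, pep_char in zip(aln_prot, aln_pep):
--         if pep_char != "-":
--             peptide_position_counter += 1
--             if peptide_position_counter == phospho_pos_in_peptide: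
--                 return protein_position_counter + 1  # return 1-based
--         if prot_char != "-":
--             protein_position_counter += 1
--     return None
-- ===== SOURCE B (Python) =====
-- def _compute_phospho_protein_pos_from_alignment(aln_prot, aln_pep, start, phospho_pos_in_peptide):
--     """Locate the alignment column of the phosphosite, then count protein residues before it."""
--     n = min(len(aln_prot), len(aln_pep))
--     cnt = 0
--     col = None
--     for i in range(n):
--         if aln_pep[i] != "-":
--             cnt += 1
--             if cnt == phospho_pos_in_peptide:
--                 col = i
--                 break
--     if col is None:
--         return None
--     return start + sum(1 for c in aln_prot[:col] if c != "-") + 1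
-- ===== Notes on version B (the rewrite author's own statement) =====
-- stated objective: alternative
-- what changed: Replaced the single interleaved zip loop tracking two counters with a locate-then-count decomposition: first find the alignment column of the target peptide residue, then count protein residues in the slice before that column.
import Mathlib
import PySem

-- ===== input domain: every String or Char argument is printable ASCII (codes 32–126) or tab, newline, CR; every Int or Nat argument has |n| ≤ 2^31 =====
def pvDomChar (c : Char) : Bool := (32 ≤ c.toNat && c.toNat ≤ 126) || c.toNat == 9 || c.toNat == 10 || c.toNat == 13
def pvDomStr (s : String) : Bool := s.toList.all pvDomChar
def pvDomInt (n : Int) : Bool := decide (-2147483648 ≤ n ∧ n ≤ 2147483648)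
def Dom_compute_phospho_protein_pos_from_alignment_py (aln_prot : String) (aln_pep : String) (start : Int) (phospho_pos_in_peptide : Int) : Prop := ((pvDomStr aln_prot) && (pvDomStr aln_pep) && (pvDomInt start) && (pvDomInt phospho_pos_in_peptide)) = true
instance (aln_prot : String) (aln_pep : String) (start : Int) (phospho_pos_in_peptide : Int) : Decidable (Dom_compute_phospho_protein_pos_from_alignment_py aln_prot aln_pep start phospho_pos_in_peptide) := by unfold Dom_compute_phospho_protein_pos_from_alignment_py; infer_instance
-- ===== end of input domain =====

-- B replaces A's single interleaved zip loop with a locate-the-column pass followed by a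
-- count over the protein prefix; same O(n) cost, different decomposition (objective: alternative).

-- ===== PORT A =====
-- the `for prot_char, pep_char in zip(...)` loop: simultaneous recursion on both char lists,
-- carrying peptide_position_counter (pc) and protein_position_counter (prc)
def pvLoopA : List Char → List Char → Int → Int → Int → Option Int
  | p :: ps, q :: qs, target, pc, prc =>
      if q ≠ '-' then
        if pc + 1 = target then some (prc + 1)
        else pvLoopA ps qs target (pc + 1) (if p ≠ '-' then prc + 1 else prc)
      else pvLoopA ps qs target pc (if p ≠ '-' then prc + 1 else prc)
  | _, _, _, _, _ => none

def compute_phospho_protein_pos_from_alignment_py (aln_prot : String) (aln_pep : String) (start : Int) (phospho_pos_in_peptide : Int) : Option Int :=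
  pvLoopA aln_prot.toList aln_pep.toList phospho_pos_in_peptide 0 start

-- ===== PORT B =====
-- first pass: column index of the phospho_pos_in_peptide-th non-gap peptide char
def pvFindCol : List Char → Int → Int → Option Nat
  | [], _, _ => none
  | c :: cs, cnt, target =>
      if c ≠ '-' then
        if cnt + 1 = target then some 0
        else (pvFindCol cs (cnt + 1) target).map Nat.succ
      else (pvFindCol cs cnt target).map Nat.succ

-- second pass: sum(1 for c in prefix if c != '-')
def pvCountNonGap : List Char → Int
  | [] => 0
  | c :: cs => (if c ≠ '-' then 1 else 0) + pvCountNonGap cs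

def compute_phospho_protein_pos_from_alignment_py_alt (aln_prot : String) (aln_pep : String) (start : Int) (phospho_pos_in_peptide : Int) : Option Int :=
  let lp := aln_prot.toList
  let lq := aln_pep.toList
  let n := min lp.length lq.length
  match pvFindCol (lq.take n) 0 phospho_pos_in_peptide with
  | none => none
  | some i => some (start + pvCountNonGap (lp.take i) + 1)

-- ===== PRECONDITION & SPEC =====
def Spec_compute_phospho_protein_pos_from_alignment_py (aln_prot : String) (aln_pep : String) (start : Int) (phospho_pos_in_peptide : Int) (out : Option Int) : Prop := out = compute_phospho_protein_pos_from_alignment_py_alt aln_prot aln_pep start phospho_pos_in_peptide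
instance (aln_prot : String) (aln_pep : String) (start : Int) (phospho_pos_in_peptide : Int) (out : Option Int) : Decidable (Spec_compute_phospho_protein_pos_from_alignment_py aln_prot aln_pep start phospho_pos_in_peptide out) := by unfold Spec_compute_phospho_protein_pos_from_alignment_py; infer_instance

-- ===== CLAIM (what is proved, stated in full; the proofs are below) =====
def Claim_equal_compute_phospho_protein_pos_from_alignment_py : Prop := ∀ (aln_prot : String) (aln_pep : String) (start : Int) (phospho_pos_in_peptide : Int), Dom_compute_phospho_protein_pos_from_alignment_py aln_prot aln_pep start phospho_pos_in_peptide → Spec_compute_phospho_protein_pos_from_alignment_py aln_prot aln_pep start phospho_pos_in_peptide (compute_phospho_protein_pos_from_alignment_py aln_prot aln_pep start phospho_pos_in_peptide)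

-- ===== LEMMAS AND PROOFS =====
lemma pvLoopA_eq_find (lp : List Char) : ∀ (lq : List Char) (target pc prc : Int),
    pvLoopA lp lq target pc prc =
      (pvFindCol (lq.take (min lp.length lq.length)) pc target).map
        (fun i => prc + pvCountNonGap (lp.take i) + 1) := by
  induction lp with
  | nil =>
      intro lq target pc prc
      simp [pvLoopA, pvFindCol]
  | cons p ps ih =>
      intro lq target pc prc
      cases lq with
      | nil => simp [pvLoopA, pvFindCol]
      | cons q qs =>
          simp only [pvLoopA, List.length_cons, Nat.succ_min_succ, List.take_succ_cons]
          by_cases hq : q = '-'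
          · simp only [hq, ne_eq, not_true_eq_false, if_false, pvFindCol]
            rw [ih]
            cases h : pvFindCol (qs.take (min ps.length qs.length)) pc target with
            | none => simp
            | some i =>
                simp only [Option.map_some, List.take_succ_cons, pvCountNonGap]
                congr 1
                by_cases hp : p = '-' <;> simp [hp] <;> ring
          · simp only [hq, ne_eq, not_false_eq_true, if_true, pvFindCol]
            by_cases ht : pc + 1 = target
            · simp [ht, pvCountNonGap]
            · simp only [ht, if_false]
              rw [ih]
              cases h : pvFindCol (qs.take (min ps.length qs.length)) (pc + 1) target with
              | none => simp
              | some i =>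
                  simp only [Option.map_some, List.take_succ_cons, pvCountNonGap]
                  congr 1
                  by_cases hp : p = '-' <;> simp [hp] <;> ring

-- ===== VERDICT (by name: the statement is the Claim_ definition above) =====
theorem compute_phospho_protein_pos_from_alignment_py_spec : Claim_equal_compute_phospho_protein_pos_from_alignment_py := by
  intro aln_prot aln_pep start target _
  unfold Spec_compute_phospho_protein_pos_from_alignment_py
  unfold compute_phospho_protein_pos_from_alignment_py compute_phospho_protein_pos_from_alignment_py_alt
  rw [pvLoopA_eq_find]
  simp only [String.length_toList]
  cases pvFindCol ((aln_pep.toList).take (min aln_prot.length aln_pep.length)) 0 target <;> rfl
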